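-- pv_equiv track=rewrite | github.com/jpridia894/programacion-ia | TEMA 1/4- Ejercicios de funciones/Ejercicio2.py | digit_position
-- ===== SOURCE A (Python) =====
-- def digit_position(numero: int, digito_buscado: int) -> int:
--     # comprueba que el digito esté entre 0 y 9
--     if not (0 <= digito_buscado <= 9):
--         return -1
--
--     # se convierte a un valor absoluto por si el número es negativo
--     numero = abs(numero)
--
--     # por si el número es 0, para que entre en el bucle
--     if numero == 0:
--         return 0 if digito_buscado == 0 else -1
--
--     posicion = 0
--     # recorremos dígito a dígito, de derecha a izquierda
--     while numero > 0:
--         ultimo_digito = numero % 10  # Extrae el dígito más a la derecha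
--         if ultimo_digito == digito_buscado:
--             return posicion  # si coincide, lo devolvemos
--         # si no, eliminamos el num que acabamos de comparar y pasamos a la siguiente posicion
--         numero //= 10
--         posicion += 1
--
--     # devolvemos -1 si no encontramos numero
--     return -1
-- ===== SOURCE B (Python) =====
-- def digit_position(numero: int, digito_buscado: int) -> int:
--     if not (0 <= digito_buscado <= 9):
--         return -1
--     return str(abs(numero))[::-1].find(str(digito_buscado))
-- ===== Notes on version B (the rewrite author's own statement) =====
-- stated objective: idiomatic
-- what changed: Replaces the %/// digit-extraction while-loop (with its special zero case) by converting the number to its decimal string and searching the digit's character in the reversed string with str.find, which directly yields the 0-based position from the right or -1.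
import Mathlib
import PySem

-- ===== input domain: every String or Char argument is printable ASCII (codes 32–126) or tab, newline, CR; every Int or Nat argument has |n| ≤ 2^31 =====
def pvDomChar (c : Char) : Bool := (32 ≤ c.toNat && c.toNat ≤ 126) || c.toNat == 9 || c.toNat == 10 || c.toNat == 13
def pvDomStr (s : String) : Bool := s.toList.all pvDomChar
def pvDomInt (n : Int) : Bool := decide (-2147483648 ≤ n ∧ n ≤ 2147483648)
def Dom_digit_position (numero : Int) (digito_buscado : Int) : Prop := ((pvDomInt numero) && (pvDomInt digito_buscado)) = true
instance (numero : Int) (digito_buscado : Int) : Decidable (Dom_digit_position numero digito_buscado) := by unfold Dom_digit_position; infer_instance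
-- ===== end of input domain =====

-- B replaces A's modulo/division digit loop by a string representation: str(abs(numero))
-- reversed and searched with .find (idiomatic; same cost).
-- ===== PORT A =====
-- while-loop of A: extract digits right-to-left with % and // (termination: n // 10 < n for n > 0)
def digitLoopA (n : Int) (d : Int) (pos : Int) : Int :=
  if h : 0 < n then
    if PySem.Int.mod n 10 = d then pos
    else digitLoopA (PySem.Int.floordiv n 10) d (pos + 1)
  else -1
termination_by n.toNat
decreasing_by
  have h10 : PySem.Int.floordiv n 10 = n / 10 := PySem.Int.floordiv_eq_ediv_of_pos (by omega)
  omega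

def digit_position (numero : Int) (digito_buscado : Int) : Int :=
  if ¬(0 ≤ digito_buscado ∧ digito_buscado ≤ 9) then -1
  else
    let n := |numero|
    if n = 0 then (if digito_buscado = 0 then 0 else -1)
    else digitLoopA n digito_buscado 0

-- ===== PORT B =====
def digit_position_alt (numero : Int) (digito_buscado : Int) : Int :=
  if ¬(0 ≤ digito_buscado ∧ digito_buscado ≤ 9) then -1
  else
    let s := PySem.Int.toStr |numero|
    match PySem.Str.slice? s none none (-1) with   -- s[::-1] (never raises)
    | some r => PySem.Str.find r (PySem.Int.toStr digito_buscado)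
    | none => -1

-- ===== PRECONDITION & SPEC =====
def Spec_digit_position (numero : Int) (digito_buscado : Int) (out : Int) : Prop := out = digit_position_alt numero digito_buscado
instance (numero : Int) (digito_buscado : Int) (out : Int) : Decidable (Spec_digit_position numero digito_buscado out) := by unfold Spec_digit_position; infer_instance

-- ===== CLAIM (what is proved, stated in full; the proofs are below) =====
def Claim_equal_digit_position : Prop := ∀ (numero : Int) (digito_buscado : Int), Dom_digit_position numero digito_buscado → Spec_digit_position numero digito_buscado (digit_position numero digito_buscado)

-- ===== LEMMAS AND PROOFS =====

theorem tdc_acc (fuel : Nat) : ∀ (n : Nat) (ds : List Char),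
    Nat.toDigitsCore 10 fuel n ds = Nat.toDigitsCore 10 fuel n [] ++ ds := by
  induction fuel with
  | zero => intro n ds; simp [Nat.toDigitsCore]
  | succ f ih =>
    intro n ds
    simp only [Nat.toDigitsCore]
    by_cases h : n / 10 = 0
    · simp [h]
    · simp only [h]
      rw [ih (n/10) _, ih (n/10) [(n % 10).digitChar]]
      simp

theorem tdc_fuel (fuel1 fuel2 : Nat) : ∀ (n : Nat), n < fuel1 → n < fuel2 →
    Nat.toDigitsCore 10 fuel1 n [] = Nat.toDigitsCore 10 fuel2 n [] := by
  induction fuel1 generalizing fuel2 with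
  | zero => intro n h1 h2; omega
  | succ f1 ih =>
    intro n h1 h2
    cases fuel2 with
    | zero => omega
    | succ f2 =>
      simp only [Nat.toDigitsCore]
      by_cases h : n / 10 = 0
      · simp [h]
      · simp only [h]
        rw [tdc_acc f1, tdc_acc f2, ih f2 (n/10) (by omega) (by omega)]

theorem toDigits_step (n : Nat) (h : 10 ≤ n) :
    Nat.toDigits 10 n = Nat.toDigits 10 (n / 10) ++ [Nat.digitChar (n % 10)] := by
  have h0 : ¬ n / 10 = 0 := by omega
  have e1 : Nat.toDigitsCore 10 (n+1) n [] = Nat.toDigitsCore 10 n (n/10) [(n % 10).digitChar] := by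
    simp [Nat.toDigitsCore, h0]
  rw [show Nat.toDigits 10 n = Nat.toDigitsCore 10 (n+1) n [] from rfl, e1, tdc_acc n,
      tdc_fuel n (n/10+1) (n/10) (by omega) (by omega)]
  rfl

theorem findgo_single (c : Char) (t : List Char) (k : Nat) :
    PySem.Chars.find.go [c] t k =
      (if PySem.Chars.find t [c] = -1 then -1 else PySem.Chars.find t [c] + k) := by
  induction t generalizing k with
  | nil => simp [PySem.Chars.find, PySem.Chars.find.go]
  | cons h t ih =>
    simp only [PySem.Chars.find, PySem.Chars.find.go]
    by_cases hc : List.isPrefixOf [c] (h :: t)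
    · simp [hc]
    · have hb := PySem.Chars.neg_one_le_find t [c]
      simp only [hc, ih, if_false, Bool.false_eq_true]
      split_ifs <;> push_cast <;> omega

theorem find_single_cons (c h : Char) (t : List Char) :
    PySem.Chars.find (h :: t) [c] =
      (if h = c then 0 else if PySem.Chars.find t [c] = -1 then -1
       else PySem.Chars.find t [c] + 1) := by
  simp only [PySem.Chars.find, PySem.Chars.find.go]
  by_cases hc : h = c
  · subst hc; simp [List.isPrefixOf]
  · have : ¬ List.isPrefixOf [c] (h :: t) := by simp [List.isPrefixOf]; exact fun e => hc e.symm
    simp only [this, hc, if_false, Bool.false_eq_true]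
    rw [show PySem.Chars.find.go [c] t (0+1) = PySem.Chars.find.go [c] t 1 from rfl, findgo_single]
    simp [PySem.Chars.find]

theorem toDigits_small (n : Nat) (h : n < 10) : Nat.toDigits 10 n = [Nat.digitChar n] := by
  have h0 : n / 10 = 0 := by omega
  simp [Nat.toDigits, Nat.toDigitsCore, h0, Nat.mod_eq_of_lt h]


-- digitChar is injective below 10 (finite check)
theorem digitChar_inj : ∀ a < 10, ∀ b < 10, (Nat.digitChar a = Nat.digitChar b ↔ a = b) := by decide

-- str(d) for a single digit
theorem toChars_digit : ∀ d : Nat, d < 10 → PySem.Int.toChars (d : Int) = [Nat.digitChar d] := by decide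

-- main loop lemma: A's while-loop equals the find over the reversed decimal digits
theorem loopA_eq_find (n : Nat) (hn : 0 < n) (d : Int) (hd0 : 0 ≤ d) (hd9 : d ≤ 9)
    (pos : Int) :
    digitLoopA (n : Int) d pos =
      (if PySem.Chars.find (Nat.toDigits 10 n).reverse [Nat.digitChar d.toNat] = -1 then -1
       else PySem.Chars.find (Nat.toDigits 10 n).reverse [Nat.digitChar d.toNat] + pos) := by
  induction n using Nat.strong_induction_on generalizing pos with
  | _ n ih =>
  rw [digitLoopA]
  have hpos : (0:Int) < (n:Int) := by exact_mod_cast hn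
  rw [dif_pos hpos]
  have hmod : PySem.Int.mod (n:Int) 10 = ((n % 10 : Nat) : Int) := by
    exact_mod_cast PySem.Int.mod_natCast n 10
  have hdiv : PySem.Int.floordiv (n:Int) 10 = ((n / 10 : Nat) : Int) := by
    exact_mod_cast PySem.Int.floordiv_natCast n 10
  have hceq : (Nat.digitChar (n % 10) = Nat.digitChar d.toNat) ↔ ((n % 10 : Nat) : Int) = d := by
    rw [digitChar_inj (n % 10) (by omega) d.toNat (by omega)]
    constructor <;> (intro h; omega)
  by_cases hbig : 10 ≤ n
  · rw [toDigits_step n hbig]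
    rw [List.reverse_append, List.reverse_singleton, List.singleton_append, find_single_cons]
    by_cases heq : ((n % 10 : Nat) : Int) = d
    · rw [if_pos (by rw [hmod]; exact heq), if_pos (hceq.mpr heq)]
      simp
    · rw [if_neg (by rw [hmod]; exact heq), if_neg (fun hc => heq (hceq.mp hc))]
      rw [hdiv, ih (n / 10) (by omega) (by omega) (pos + 1)]
      have hb := PySem.Chars.neg_one_le_find (Nat.toDigits 10 (n / 10)).reverse [Nat.digitChar d.toNat]
      split_ifs <;> omega
  · have hsmall : n < 10 := by omega
    rw [toDigits_small n hsmall, List.reverse_singleton, find_single_cons]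
    by_cases heq : ((n % 10 : Nat) : Int) = d
    · have : Nat.digitChar n = Nat.digitChar d.toNat := by
        have : n % 10 = n := Nat.mod_eq_of_lt hsmall
        rw [← this]; exact (digitChar_inj (n % 10) (by omega) d.toNat (by omega)).mpr (by omega)
      rw [if_pos (by rw [hmod]; exact heq), if_pos this]
      simp
    · have hne : ¬ Nat.digitChar n = Nat.digitChar d.toNat := by
        intro hc
        have := (digitChar_inj n (by omega) d.toNat (by omega)).mp hc
        omega
      rw [if_neg (by rw [hmod]; exact heq), if_neg hne]
      rw [hdiv]
      have : ((n / 10 : Nat) : Int) = 0 := by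
        have : n / 10 = 0 := by omega
        simp [this]
      rw [this, digitLoopA]
      simp [PySem.Chars.find, PySem.Chars.find.go]

-- ===== VERDICT (by name: the statement is the Claim_ definition above) =====
theorem digit_position_spec : Claim_equal_digit_position := by
  intro numero d _
  unfold Spec_digit_position digit_position digit_position_alt
  by_cases hd : 0 ≤ d ∧ d ≤ 9
  · rw [if_neg (not_not.mpr hd), if_neg (not_not.mpr hd)]
    simp only [PySem.Str.slice?_none_none_neg_one, PySem.Str.find, String.toList_ofList,
      PySem.Int.toList_toStr]
    have habs : |numero| = ((numero.natAbs : Nat) : Int) := by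
      exact_mod_cast Int.abs_eq_natAbs numero
    have hdch : PySem.Int.toChars d = [Nat.digitChar d.toNat] := by
      have := toChars_digit d.toNat (by omega)
      rwa [show ((d.toNat : Nat) : Int) = d by omega] at this
    rw [habs, hdch]
    by_cases h0 : numero.natAbs = 0
    · rw [h0]
      norm_num
      rw [show PySem.Int.toChars 0 = ['0'] from rfl]
      rw [show (['0'] : List Char).reverse = ['0'] from rfl, find_single_cons]
      have : ('0' = Nat.digitChar d.toNat) ↔ d = 0 := by
        rw [show '0' = Nat.digitChar 0 from rfl,
            digitChar_inj 0 (by omega) d.toNat (by omega)]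
        omega
      by_cases hd0 : d = 0
      · rw [if_pos hd0, if_pos (this.mpr hd0)]
      · rw [if_neg hd0, if_neg (fun hc => hd0 (this.mp hc))]
        simp [PySem.Chars.find, PySem.Chars.find.go]
    · rw [if_neg (by exact_mod_cast h0)]
      rw [show PySem.Int.toChars ((numero.natAbs : Nat) : Int) = Nat.toDigits 10 numero.natAbs by
            simp only [PySem.Int.toChars]
            rw [if_neg (by omega)]
            congr 1]
      rw [loopA_eq_find numero.natAbs (by omega) d hd.1 hd.2 0]
      split_ifs <;> omega
  · rw [if_pos hd, if_pos hd]
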